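-- pv_equiv track=rewrite | github.com/pypi-data/pypi-mirror-291 | packages/riyazi/riyazi-0.17.1.tar.gz/riyazi-0.17.1/riyazi/math/numerics.py | amin
-- ===== SOURCE A (Python) =====
-- def abs(num):
--     """
--     Find the absolute value of a number.
--
--     >>> abs_val(-5.1)
--     5.1
--     >>> abs_val(-5) == abs_val(5)
--     True
--     >>> abs_val(0)
--     0
--     """
--     return -num if num < 0 else num
--
-- def amin(x: list[int]) -> int:
--     """
--     >>> abs_min([0,5,1,11])
--     0
--     >>> abs_min([3,-10,-2])
--     -2
--     >>> abs_min([])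
--     Traceback (most recent call last):
--         ...
--     ValueError: abs_min() arg is an empty sequence
--     """
--     if len(x) == 0:
--         raise ValueError("abs_min() arg is an empty sequence")
--     j = x[0]
--     for i in x:
--         if abs(i) < abs(j):
--             j = i
--     return j
-- ===== SOURCE B (Python) =====
-- def abs(num):
--     return -num if num < 0 else num
--
-- def amin(x: list[int]) -> int:
--     if len(x) == 0:
--         raise ValueError("abs_min() arg is an empty sequence")
--     return sorted(x, key=abs)[0]
-- ===== Notes on version B (the rewrite author's own statement) =====
-- stated objective: alternative
-- what changed: Replaces the manual first-minimum scan with sorted(x, key=abs)[0]; the stable sort puts the first element of minimal absolute value at index 0.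
import Mathlib
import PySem

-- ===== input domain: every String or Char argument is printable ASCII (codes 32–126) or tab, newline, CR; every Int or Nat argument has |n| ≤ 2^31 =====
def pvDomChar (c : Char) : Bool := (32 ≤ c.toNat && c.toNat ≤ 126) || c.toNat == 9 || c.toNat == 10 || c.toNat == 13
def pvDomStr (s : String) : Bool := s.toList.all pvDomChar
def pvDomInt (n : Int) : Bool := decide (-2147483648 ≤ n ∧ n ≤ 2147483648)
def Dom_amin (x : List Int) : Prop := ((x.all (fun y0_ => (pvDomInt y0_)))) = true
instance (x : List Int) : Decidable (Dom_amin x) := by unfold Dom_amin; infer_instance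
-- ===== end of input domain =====

-- B replaces A's manual first-minimum scan with sorted(x, key=abs)[0] (stable sort keeps the first minimal element first); same ValueError guard on [].


-- ===== PORT A =====
-- module-level helper 'abs' of Source A
def pyAbs (num : Int) : Int := if num < 0 then -num else num

-- A: guard (raises on [], excluded by Pre_amin), j = x[0], scan keeping the first strict minimum of |·|
def amin (x : List Int) : Int :=
  if x.length = 0 then 0  -- Python raises ValueError here; outside Pre_amin
  else
    let j := x.headD 0    -- x[0]; x is nonempty on this branch
    x.foldl (fun j i => if pyAbs i < pyAbs j then i else j) j

-- ===== PORT B =====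
-- B: same guard, then sorted(x, key=abs)[0]; x[0] of the nonempty sort is its head
def amin_alt (x : List Int) : Int :=
  if x.length = 0 then 0  -- Python raises ValueError here; outside Pre_amin
  else (PySem.List.sorted x (fun i => pyAbs i) false).headD 0

-- ===== PRECONDITION & SPEC =====
-- A (and B) raise ValueError on the empty list; Pre_ excludes exactly that input.
def Pre_amin (x : List Int) : Prop := x ≠ []
instance (x : List Int) : Decidable (Pre_amin x) := by unfold Pre_amin; infer_instance
def pvWitness_amin : List Int := [3, -10, -2]

def Spec_amin (x : List Int) (out : Int) : Prop := out = amin_alt x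
instance (x : List Int) (out : Int) : Decidable (Spec_amin x out) := by unfold Spec_amin; infer_instance

-- ===== CLAIM (what is proved, stated in full; the proofs are below) =====
def Claim_equal_amin : Prop := ∀ (x : List Int), Dom_amin x → Pre_amin x → Spec_amin x (amin x)

-- ===== LEMMAS AND PROOFS =====

-- head of an insertion step: the new element takes the head iff it strictly beats the old head
theorem head_insertBy (i a : Int) (t : List Int) :
    (PySem.List.insertBy (fun p q => decide (pyAbs p < pyAbs q)) i (a :: t)).headD 0
      = if pyAbs i < pyAbs a then i else a := by
  simp [PySem.List.insertBy]
  split_ifs <;> simp_all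

theorem insertBy_ne_nil (i : Int) (l : List Int) :
    PySem.List.insertBy (fun p q => decide (pyAbs p < pyAbs q)) i l ≠ [] := by
  cases l with
  | nil => simp [PySem.List.insertBy]
  | cons a t =>
    simp only [PySem.List.insertBy]
    split_ifs <;> simp

-- invariant: the head of the insertion-sort accumulator tracks A's scan state
theorem fold_head (l : List Int) : ∀ (acc : List Int), acc ≠ [] →
    (l.foldl (fun acc i => PySem.List.insertBy (fun p q => decide (pyAbs p < pyAbs q)) i acc) acc).headD 0
      = l.foldl (fun j i => if pyAbs i < pyAbs j then i else j) (acc.headD 0) := by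
  induction l with
  | nil => intro acc _; simp
  | cons i l ih =>
    intro acc hne
    cases acc with
    | nil => exact absurd rfl hne
    | cons a t =>
      simp only [List.foldl_cons]
      rw [ih _ (insertBy_ne_nil i (a :: t)), head_insertBy]
      simp

-- ===== VERDICT (by name: the statement is the Claim_ definition above) =====
theorem amin_spec : Claim_equal_amin := by
  intro x _ hpre
  unfold Spec_amin amin amin_alt
  cases x with
  | nil => exact absurd rfl hpre
  | cons h t =>
    simp only [List.length_cons, Nat.succ_ne_zero, if_false, List.headD_cons]
    rw [PySem.List.sorted_eq_foldl_insertBy]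
    simp only [List.foldl_cons]
    have h1 : PySem.List.insertBy (fun p q => decide (pyAbs p < pyAbs q)) h ([] : List Int) = [h] := by
      simp [PySem.List.insertBy]
    rw [h1, fold_head t [h] (by simp)]
    simp
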